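-- pv_equiv track=rewrite | github.com/MrBrantCode/unitest_baseline | mut_generate/mist_train_cf/cf_1361/solution.py | split_string_with_nested_delimiters
-- ===== SOURCE A (Python) =====
-- def split_string_with_nested_delimiters(string, delimiter):
--     result = []
--     stack = []
--     current = ''
--
--     for char in string:
--         if char == delimiter and not stack:
--             result.append(current)
--             current = ''
--         else:
--             current += char
--             if char in '([{':
--                 stack.append(char)
--             elif char in ')]}' and stack:
--                 if (char == ')' and stack[-1] == '(') or \
--                    (char == ']' and stack[-1] == '[') or \
--                    (char == '}' and stack[-1] == '{'):
--                     stack.pop()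
--
--     result.append(current)
--     return result
-- ===== SOURCE B (Python) =====
-- def split_string_with_nested_delimiters(string, delimiter):
--     # Pass 1: record indices of top-level delimiters, using the same matching-type bracket stack.
--     stack = []
--     cuts = []
--     for i, char in enumerate(string):
--         if char == delimiter and not stack:
--             cuts.append(i)
--         else:
--             if char in '([{':
--                 stack.append(char)
--             elif char in ')]}' and stack:
--                 if (char == ')' and stack[-1] == '(') or \
--                    (char == ']' and stack[-1] == '[') or \
--                    (char == '}' and stack[-1] == '{'):
--                     stack.pop()
--     # Pass 2: slice the original string between consecutive cut points.
--     parts = []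
--     start = 0
--     for c in cuts:
--         parts.append(string[start:c])
--         start = c + 1
--     parts.append(string[start:])
--     return parts
-- ===== Notes on version B (the rewrite author's own statement) =====
-- stated objective: alternative
-- what changed: B replaces A's char-by-char accumulation of the current segment with a two-pass index-table decomposition: one scan (same matching-type bracket stack) records the indices of top-level delimiters, then the result is built by slicing the original string between consecutive recorded indices.
import Mathlib
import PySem

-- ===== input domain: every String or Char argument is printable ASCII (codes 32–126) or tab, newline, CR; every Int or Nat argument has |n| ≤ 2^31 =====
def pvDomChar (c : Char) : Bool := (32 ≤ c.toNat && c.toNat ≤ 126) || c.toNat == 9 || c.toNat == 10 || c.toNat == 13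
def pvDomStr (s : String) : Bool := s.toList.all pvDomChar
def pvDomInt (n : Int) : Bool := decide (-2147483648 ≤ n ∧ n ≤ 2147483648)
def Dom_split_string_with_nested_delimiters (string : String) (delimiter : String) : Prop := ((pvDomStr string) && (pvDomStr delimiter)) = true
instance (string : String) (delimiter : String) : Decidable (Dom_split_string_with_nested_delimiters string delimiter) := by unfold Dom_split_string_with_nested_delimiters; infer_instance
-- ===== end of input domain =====

-- B replaces A's char-by-char segment accumulation by one scan recording the indices of the
-- top-level delimiters (same matching-type bracket stack) followed by slicing the original
-- string between consecutive cut points (objective: alternative decomposition, same cost).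

-- shared bracket-stack update, the `if char in '([{' … elif char in ')]}' and stack …` chain
-- that appears verbatim in both Python sources (top of stack = head of the list)
def pvBracketStep (c : Char) (st : List Char) : List Char :=
  if c = '(' ∨ c = '[' ∨ c = '{' then c :: st
  else if c = ')' ∨ c = ']' ∨ c = '}' then
    match st with
    | [] => []
    | top :: rest =>
      if (c = ')' ∧ top = '(') ∨ (c = ']' ∧ top = '[') ∨ (c = '}' ∧ top = '{') then rest
      else top :: rest
  else st

-- ===== PORT A =====
-- A's for-loop over the characters with state (result, stack, current);
-- `char == delimiter` (char a 1-character string) is `delimiter.toList = [c]`.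
def pvALoop (delim : String) : List Char → List (List Char) → List Char → List Char →
    (List (List Char) × List Char × List Char)
  | [], result, stack, current => (result, stack, current)
  | c :: cs, result, stack, current =>
    if delim.toList = [c] ∧ stack = [] then
      pvALoop delim cs (result ++ [current]) stack []
    else
      pvALoop delim cs result (pvBracketStep c stack) (current ++ [c])

def split_string_with_nested_delimiters (string : String) (delimiter : String) : List String :=
  ((pvALoop delimiter string.toList [] [] []).1
    ++ [(pvALoop delimiter string.toList [] [] []).2.2]).map String.ofList

-- ===== PORT B =====
-- pass 1 of Source B: the enumerate loop collecting the indices of top-level delimiters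
def pvCuts (delim : String) : List Char → List Char → Nat → List Nat
  | [], _, _ => []
  | c :: cs, stack, i =>
    if delim.toList = [c] ∧ stack = [] then i :: pvCuts delim cs stack (i + 1)
    else pvCuts delim cs (pvBracketStep c stack) (i + 1)

-- pass 2 of Source B: `string[start:c]` between consecutive cuts, then the trailing `string[start:]`
-- (slices with 0 ≤ start ≤ c ≤ len, so drop/take is exact)
def pvBuild (full : List Char) : Nat → List Nat → List (List Char)
  | start, [] => [full.drop start]
  | start, c :: rest => (full.drop start).take (c - start) :: pvBuild full (c + 1) rest

def split_string_with_nested_delimiters_alt (string : String) (delimiter : String) : List String :=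
  (pvBuild string.toList 0 (pvCuts delimiter string.toList [] 0)).map String.ofList

-- ===== PRECONDITION & SPEC =====
def Spec_split_string_with_nested_delimiters (string : String) (delimiter : String) (out : List String) : Prop := out = split_string_with_nested_delimiters_alt string delimiter
instance (string : String) (delimiter : String) (out : List String) : Decidable (Spec_split_string_with_nested_delimiters string delimiter out) := by unfold Spec_split_string_with_nested_delimiters; infer_instance

-- ===== CLAIM (what is proved, stated in full; the proofs are below) =====
def Claim_equal_split_string_with_nested_delimiters : Prop := ∀ (string : String) (delimiter : String), Dom_split_string_with_nested_delimiters string delimiter → Spec_split_string_with_nested_delimiters string delimiter (split_string_with_nested_delimiters string delimiter)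

-- ===== LEMMAS AND PROOFS =====

-- reference splitter both ports are reduced to
def pvCore (delim : String) : List Char → List Char → List (List Char)
  | [], _ => [[]]
  | c :: cs, st =>
    if delim.toList = [c] ∧ st = [] then [] :: pvCore delim cs st
    else
      match pvCore delim cs (pvBracketStep c st) with
      | [] => []
      | h :: t => (c :: h) :: t

def pvConsHead (cur : List Char) : List (List Char) → List (List Char)
  | [] => []
  | h :: t => (cur ++ h) :: t

theorem pvCore_ne_nil (delim : String) (cs st : List Char) : pvCore delim cs st ≠ [] := by
  induction cs generalizing st with
  | nil => simp [pvCore]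
  | cons c cs ih =>
    simp only [pvCore]
    split
    · simp
    · rcases h : pvCore delim cs (pvBracketStep c st) with _ | ⟨h₁, t⟩
      · exact absurd h (ih _)
      · simp

theorem pvA_core (delim : String) (cs : List Char) : ∀ (st res cur),
    (pvALoop delim cs res st cur).1 ++ [(pvALoop delim cs res st cur).2.2]
      = res ++ pvConsHead cur (pvCore delim cs st) := by
  induction cs with
  | nil => intro st res cur; simp [pvALoop, pvCore, pvConsHead]
  | cons c cs ih =>
    intro st res cur
    by_cases hc : delim.toList = [c] ∧ st = []
    · simp only [pvALoop, pvCore, if_pos hc, ih]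
      rcases h : pvCore delim cs st with _ | ⟨h₁, t⟩
      · exact absurd h (pvCore_ne_nil delim cs st)
      · simp [pvConsHead]
    · simp only [pvALoop, pvCore, if_neg hc, ih]
      rcases h : pvCore delim cs (pvBracketStep c st) with _ | ⟨h₁, t⟩
      · exact absurd h (pvCore_ne_nil delim cs _)
      · simp only [pvConsHead]
        simp

theorem pvCuts_ge (delim : String) (cs : List Char) : ∀ (st : List Char) (i j : Nat),
    j ∈ pvCuts delim cs st i → i ≤ j := by
  induction cs with
  | nil => intro st i j h; simp [pvCuts] at h
  | cons c cs ih =>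
    intro st i j h
    simp only [pvCuts] at h
    split at h
    · rcases List.mem_cons.mp h with rfl | h
      · exact le_rfl
      · exact Nat.le_of_succ_le (ih _ _ _ h)
    · exact Nat.le_of_succ_le (ih _ _ _ h)

theorem pvBuild_shift (full cs : List Char) (c : Char) (i : Nat) (L : List Nat)
    (hdrop : full.drop i = c :: cs)
    (hL : ∀ j ∈ L, i + 1 ≤ j) :
    pvBuild full i L = pvConsHead [c] (pvBuild full (i + 1) L) := by
  have hdrop' : full.drop (i + 1) = cs := by
    rw [← List.drop_drop, hdrop]
    simp
  cases L with
  | nil => simp [pvBuild, pvConsHead, hdrop, hdrop']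
  | cons j rest =>
    have hj : i + 1 ≤ j := hL j (List.mem_cons_self ..)
    have h1 : j - i = (j - (i + 1)) + 1 := by omega
    simp only [pvBuild, pvConsHead, hdrop, hdrop', h1, List.take_succ_cons]
    simp

theorem pvB_core (delim : String) (full : List Char) (cs : List Char) : ∀ (st : List Char) (i : Nat),
    full.drop i = cs → pvBuild full i (pvCuts delim cs st i) = pvCore delim cs st := by
  induction cs with
  | nil => intro st i h; simp [pvCuts, pvBuild, pvCore, h]
  | cons c cs ih =>
    intro st i h
    have hdrop' : full.drop (i + 1) = cs := by
      rw [← List.drop_drop, h]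
      simp
    by_cases hc : delim.toList = [c] ∧ st = []
    · simp only [pvCuts, pvCore, if_pos hc, pvBuild]
      rw [ih st (i + 1) hdrop']
      simp
    · simp only [pvCuts, pvCore, if_neg hc]
      rw [pvBuild_shift full cs c i _ h (fun j hj => pvCuts_ge delim cs _ _ j hj),
        ih (pvBracketStep c st) (i + 1) hdrop']
      rcases hcore : pvCore delim cs (pvBracketStep c st) with _ | ⟨h₁, t⟩
      · exact absurd hcore (pvCore_ne_nil delim cs _)
      · simp [pvConsHead]

-- ===== VERDICT (by name: the statement is the Claim_ definition above) =====
theorem split_string_with_nested_delimiters_spec : Claim_equal_split_string_with_nested_delimiters := by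
  intro string delimiter _
  unfold Spec_split_string_with_nested_delimiters
  unfold split_string_with_nested_delimiters split_string_with_nested_delimiters_alt
  rw [pvB_core delimiter string.toList string.toList [] 0 (by simp)]
  have := pvA_core delimiter string.toList [] [] []
  simp only [List.nil_append] at this
  rw [this]
  rcases h : pvCore delimiter string.toList [] with _ | ⟨h₁, t⟩
  · exact absurd h (pvCore_ne_nil _ _ _)
  · simp [pvConsHead]
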